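-- pv_equiv track=rewrite | github.com/paras1810/DSA2 | DSA-main/interview/Archive/wishkist/problem1.py | required_starting_amount
-- ===== SOURCE A (Python) =====
-- def required_starting_amount(earnings_expenses):
--     balance = 0
--     min_balance = 0
--
--     for daily_change in earnings_expenses:
--         balance += daily_change
--         if balance<0:
--             required = -1*balance+1
--             min_balance = max(required, min_balance)
--     return min_balance
-- ===== SOURCE B (Python) =====
-- def required_starting_amount(earnings_expenses):
--     # Divide and conquer: each segment yields (total, lowest), where lowest is
--     # min(0, minimum prefix sum of the segment); halves combine by
--     # lowest = min(lowest_left, total_left + lowest_right).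
--     def scan(seg):
--         if len(seg) == 1:
--             return seg[0], min(0, seg[0])
--         mid = len(seg) // 2
--         tl, ll = scan(seg[:mid])
--         tr, lr = scan(seg[mid:])
--         return tl + tr, min(ll, tl + lr)
--     if not earnings_expenses:
--         return 0
--     lowest = scan(earnings_expenses)[1]
--     return 1 - lowest if lowest < 0 else 0
-- ===== Notes on version B (the rewrite author's own statement) =====
-- stated objective: alternative
-- what changed: Replaces A's single left-to-right scan with running balance and running max of requirements by a divide-and-conquer recursion that computes (segment total, clamped minimum prefix sum) for each half and combines them, then derives the answer by a closed form.
import Mathlib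
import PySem

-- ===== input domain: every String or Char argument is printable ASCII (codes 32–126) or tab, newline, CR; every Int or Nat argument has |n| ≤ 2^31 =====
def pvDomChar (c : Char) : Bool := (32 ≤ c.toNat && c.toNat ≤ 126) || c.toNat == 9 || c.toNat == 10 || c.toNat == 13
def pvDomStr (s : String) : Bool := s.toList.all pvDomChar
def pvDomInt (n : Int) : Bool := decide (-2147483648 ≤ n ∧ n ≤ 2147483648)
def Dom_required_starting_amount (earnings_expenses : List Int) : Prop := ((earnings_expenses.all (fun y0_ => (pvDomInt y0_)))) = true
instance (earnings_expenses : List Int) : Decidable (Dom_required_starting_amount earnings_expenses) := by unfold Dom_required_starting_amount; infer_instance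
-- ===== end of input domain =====

-- B replaces A's left-to-right scan (running balance + running max of requirements) by a
-- divide-and-conquer recursion over halves of the list (alternative decomposition, same result).

-- ===== PORT A =====
def required_starting_amount (earnings_expenses : List Int) : Int :=
  (earnings_expenses.foldl
    (fun (st : Int × Int) daily_change =>
      let balance := st.1 + daily_change
      if balance < 0 then
        let required := -1 * balance + 1
        (balance, max required st.2)
      else (balance, st.2))
    (0, 0)).2

-- ===== PORT B =====
-- scan(seg): returns (total of seg, min(0, minimum prefix sum of seg));
-- the `seg.length < 1` branch is a Lean totality guard only — B never calls scan on an
-- empty segment (both recursive slices are nonempty since len ≥ 2 there).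
def rsaScan (seg : List Int) : Int × Int :=
  if seg.length = 1 then
    (seg.headI, min 0 seg.headI)   -- seg[0]; exact, the segment has length 1
  else if seg.length < 1 then (0, 0)
  else
    let mid := seg.length / 2      -- len(seg) // 2 on a Nat: exact
    let l := rsaScan (seg.take mid)   -- seg[:mid]
    let r := rsaScan (seg.drop mid)   -- seg[mid:]
    (l.1 + r.1, min l.2 (l.1 + r.2))
termination_by seg.length
decreasing_by
  · simp only [List.length_take]; omega
  · simp only [List.length_drop]; omega

def required_starting_amount_alt (earnings_expenses : List Int) : Int :=
  if earnings_expenses = [] then 0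
  else
    let lowest := (rsaScan earnings_expenses).2
    if lowest < 0 then 1 - lowest else 0

-- ===== PRECONDITION & SPEC =====
def Spec_required_starting_amount (earnings_expenses : List Int) (out : Int) : Prop := out = required_starting_amount_alt earnings_expenses
instance (earnings_expenses : List Int) (out : Int) : Decidable (Spec_required_starting_amount earnings_expenses out) := by unfold Spec_required_starting_amount; infer_instance

-- ===== CLAIM (what is proved, stated in full; the proofs are below) =====
def Claim_equal_required_starting_amount : Prop := ∀ (earnings_expenses : List Int), Dom_required_starting_amount earnings_expenses → Spec_required_starting_amount earnings_expenses (required_starting_amount earnings_expenses)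

-- ===== LEMMAS AND PROOFS =====



-- minimum over the nonempty prefix sums of a nonempty list (0 on []; only used on nonempty lists)
def rsaLp : List Int → Int
  | [] => 0
  | x :: t => min x (x + rsaLp t)

lemma rsaLp_le_sum (xs : List Int) : rsaLp xs ≤ xs.sum := by
  induction xs with
  | nil => simp [rsaLp]
  | cons x t ih => simp only [rsaLp, List.sum_cons]; omega

lemma rsaLp_append (a b : List Int) (ha : a ≠ []) (hb : b ≠ []) :
    rsaLp (a ++ b) = min (rsaLp a) (a.sum + rsaLp b) := by
  induction a with
  | nil => exact absurd rfl ha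
  | cons x a' ih =>
    cases a' with
    | nil =>
      cases b with
      | nil => exact absurd rfl hb
      | cons y b' => simp [rsaLp]
    | cons z a'' =>
      have h := ih (List.cons_ne_nil _ _)
      simp only [List.cons_append, rsaLp, List.sum_cons] at *
      omega

lemma rsaScan_spec : ∀ (n : ℕ) (seg : List Int), seg.length = n → seg ≠ [] →
    rsaScan seg = (seg.sum, min 0 (rsaLp seg)) := by
  intro n
  induction n using Nat.strong_induction_on with
  | _ n ih =>
    intro seg hlen hne
    rw [rsaScan]
    by_cases h1 : seg.length = 1
    · match seg, h1 with
      | [x], _ => simp [rsaLp]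
    · have hge : 2 ≤ seg.length := by
        cases seg with
        | nil => exact absurd rfl hne
        | cons y t => cases t with
          | nil => simp at h1
          | cons z t' => simp [List.length_cons]
      simp only [h1, if_false]
      have hlt : ¬ seg.length < 1 := by omega
      simp only [hlt, if_false]
      have hmid1 : 1 ≤ seg.length / 2 := by omega
      have hmid2 : seg.length / 2 < seg.length := by omega
      have htake : (seg.take (seg.length / 2)).length = seg.length / 2 := by
        simp [List.length_take]; omega
      have hdrop : (seg.drop (seg.length / 2)).length = seg.length - seg.length / 2 := by
        simp [List.length_drop]
      have htne : seg.take (seg.length / 2) ≠ [] := by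
        intro h; rw [h] at htake; simp at htake; omega
      have hdne : seg.drop (seg.length / 2) ≠ [] := by
        intro h; rw [h] at hdrop; simp at hdrop; omega
      rw [ih _ (by omega) _ htake htne,
          ih _ (by rw [hdrop]; omega) _ rfl hdne]
      have hsum : (seg.take (seg.length / 2)).sum + (seg.drop (seg.length / 2)).sum = seg.sum := by
        conv_rhs => rw [← List.take_append_drop (seg.length / 2) seg]
        rw [List.sum_append]
      have hlp : rsaLp seg = min (rsaLp (seg.take (seg.length / 2)))
          ((seg.take (seg.length / 2)).sum + rsaLp (seg.drop (seg.length / 2))) := by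
        conv_lhs => rw [← List.take_append_drop (seg.length / 2) seg]
        exact rsaLp_append _ _ htne hdne
      have hle := rsaLp_le_sum (seg.take (seg.length / 2))
      simp only [Prod.mk.injEq]
      constructor
      · exact hsum
      · rw [hlp]; omega

-- A's loop, unrolled into a recursive description of its second component
def rsaG (b : Int) : List Int → Int
  | [] => 0
  | x :: t => max (if b + x < 0 then 1 - (b + x) else 0) (rsaG (b + x) t)

lemma foldA_eq_rsaG (xs : List Int) : ∀ (b r : Int), 0 ≤ r →
    (xs.foldl
      (fun (st : Int × Int) daily_change =>
        let balance := st.1 + daily_change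
        if balance < 0 then
          let required := -1 * balance + 1
          (balance, max required st.2)
        else (balance, st.2))
      (b, r)).2 = max r (rsaG b xs) := by
  induction xs with
  | nil => intro b r hr; simp [rsaG]; omega
  | cons x t ih =>
    intro b r hr
    simp only [List.foldl, rsaG]
    by_cases h : b + x < 0
    · simp only [h, if_true]
      rw [ih (b + x) (max (-1 * (b + x) + 1) r) (by omega)]
      omega
    · simp only [h, if_false]
      rw [ih (b + x) r hr]
      omega

lemma rsaG_cons (b x : Int) (t : List Int) :
    rsaG b (x :: t) = max (if b + x < 0 then 1 - (b + x) else 0) (rsaG (b + x) t) := rfl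

lemma rsaG_eq_f (xs : List Int) (hne : xs ≠ []) : ∀ (b : Int),
    rsaG b xs = if b + rsaLp xs < 0 then 1 - (b + rsaLp xs) else 0 := by
  induction xs with
  | nil => exact absurd rfl hne
  | cons x t ih =>
    intro b
    cases t with
    | nil => simp only [rsaG, rsaLp]; split_ifs <;> omega
    | cons y t' =>
      rw [rsaG_cons, ih (by simp) (b + x)]
      simp only [rsaLp]
      split_ifs <;> omega

theorem required_starting_amount_spec : Claim_equal_required_starting_amount := by
  unfold Claim_equal_required_starting_amount
  intro xs _
  unfold Spec_required_starting_amount required_starting_amount required_starting_amount_alt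
  cases hx : xs with
  | nil => simp
  | cons a t =>
    have hne : xs ≠ [] := by rw [hx]; simp
    rw [← hx]
    simp only [hne, if_false]
    rw [rsaScan_spec xs.length xs rfl hne]
    rw [foldA_eq_rsaG xs 0 0 le_rfl, rsaG_eq_f xs hne 0]
    have := rsaLp_le_sum xs
    simp only [zero_add]
    split_ifs <;> omega
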